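-- pv_equiv track=rewrite | github.com/NikitaMuchanko/chech_labs | 5_laba/2_dop.py | find_most_zeros_and_total
-- ===== SOURCE A (Python) =====
-- def find_most_zeros_and_total(grid):
--     max_zero_row = 0
--     max_zero_count = 0
--     max_sum_col = 0
--     max_sum = 0
--
--     for row in grid:
--         zero_count = row.count(0)
--         if zero_count > max_zero_count:
--             max_zero_count = zero_count
--             max_zero_row = len(row)
--
--     for col in zip(*grid):  # Transpose the grid to iterate over columns
--         sum_col = sum(col)
--         if sum_col > max_sum:
--             max_sum = sum_col
--             max_sum_col = len(col)
--
--     return max_zero_row, max_sum_col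
-- ===== SOURCE B (Python) =====
-- def find_most_zeros_and_total(grid):
--     best_row_len = 0
--     best_zeros = 0
--     sums = None
--     for row in grid:
--         z = sum(1 for x in row if x == 0)
--         if z > best_zeros:
--             best_zeros = z
--             best_row_len = len(row)
--         if sums is None:
--             sums = list(row)
--         else:
--             sums = [a + b for a, b in zip(sums, row)]
--     best_col_len = 0
--     top = 0
--     for s in (sums or []):
--         if s > top:
--             top = s
--             best_col_len = len(grid)  # each column holds one entry per row
--     return best_row_len, best_col_len
-- ===== Notes on version B (the rewrite author's own statement) =====
-- stated objective: alternative
-- what changed: B fuses A's two passes into one row-major scan that maintains a running column-sum list via zip truncation (no transpose), then takes a running max over those sums.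
import Mathlib
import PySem

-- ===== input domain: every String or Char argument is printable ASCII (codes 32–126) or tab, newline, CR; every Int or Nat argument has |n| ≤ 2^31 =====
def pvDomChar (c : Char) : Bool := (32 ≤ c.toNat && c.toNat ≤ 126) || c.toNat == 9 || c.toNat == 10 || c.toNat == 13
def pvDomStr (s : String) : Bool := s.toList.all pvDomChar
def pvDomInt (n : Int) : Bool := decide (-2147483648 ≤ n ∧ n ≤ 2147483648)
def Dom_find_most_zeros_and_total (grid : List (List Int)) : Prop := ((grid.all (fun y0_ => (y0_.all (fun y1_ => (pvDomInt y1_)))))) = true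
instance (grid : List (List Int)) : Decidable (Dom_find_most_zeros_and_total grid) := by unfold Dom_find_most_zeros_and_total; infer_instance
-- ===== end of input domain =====

-- B fuses A's two passes into one row-major scan that maintains a running column-sum list
-- (zip truncation on ragged rows), replacing the transpose (objective: alternative).

-- ===== PORT A =====
-- zip(*grid): emit columns while every remaining row is nonempty (Python zip truncation)
def pvZipStar (gs : List (List Int)) : List (List Int) :=
  match gs with
  | [] => []
  | g :: rest =>
    match g with
    | [] => []
    | x :: xs =>
      if rest.all (fun r => !r.isEmpty) then
        (x :: rest.map (fun r => r.headD 0)) :: pvZipStar (xs :: rest.map (fun r => r.drop 1))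
      else []
termination_by (gs.headD []).length
decreasing_by simp

def find_most_zeros_and_total (grid : List (List Int)) : Int × Int :=
  -- state: (max_zero_row, max_zero_count)
  let s1 := grid.foldl (fun (st : Int × Int) row =>
      if (PySem.List.count row 0 : Int) > st.2 then ((row.length : Int), (PySem.List.count row 0 : Int)) else st) (0, 0)
  -- state: (max_sum_col, max_sum)
  let s2 := (pvZipStar grid).foldl (fun (st : Int × Int) col =>
      if col.sum > st.2 then ((col.length : Int), col.sum) else st) (0, 0)
  (s1.1, s2.1)

-- ===== PORT B =====
def find_most_zeros_and_total_alt (grid : List (List Int)) : Int × Int :=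
  -- fused pass; state: (best_row_len, best_zeros, sums : Option (List Int))
  let st := grid.foldl
    (fun (st : Int × Int × Option (List Int)) row =>
      let z : Int := row.foldl (fun acc x => if x == 0 then acc + 1 else acc) 0
      let st1 := if z > st.2.1 then ((row.length : Int), z, st.2.2) else st
      let sums := match st1.2.2 with
        | none => some row
        | some s => some (List.zipWith (· + ·) s row)
      (st1.1, st1.2.1, sums))
    (0, 0, none)
  -- second loop: for s in (sums or []): running max, state (best_col_len, top)
  let second := (st.2.2.getD []).foldl
    (fun (p : Int × Int) s => if s > p.2 then ((grid.length : Int), s) else p) (0, 0)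
  (st.1, second.1)

-- ===== PRECONDITION & SPEC =====
def Spec_find_most_zeros_and_total (grid : List (List Int)) (out : Int × Int) : Prop := out = find_most_zeros_and_total_alt grid
instance (grid : List (List Int)) (out : Int × Int) : Decidable (Spec_find_most_zeros_and_total grid out) := by unfold Spec_find_most_zeros_and_total; infer_instance

-- ===== CLAIM =====
def Claim_equal_find_most_zeros_and_total : Prop := ∀ (grid : List (List Int)), Dom_find_most_zeros_and_total grid → Spec_find_most_zeros_and_total grid (find_most_zeros_and_total grid)

-- ===== LEMMAS AND PROOFS =====

def pvColSum (gs : List (List Int)) (i : Nat) : Int := (gs.map (fun r => r.getD i 0)).sum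
def pvMinL (gs : List (List Int)) : Nat := ((gs.map List.length).min?).getD 0

theorem pv_zcount (row : List Int) :
    row.foldl (fun acc x => if x == 0 then acc + 1 else acc) (0:Int) = (List.count 0 row : Int) := by
  simpa using PySem.List.foldl_beq_add_one (l := row) (v := 0) (a := 0)

-- one fused step splits into A's zero-count step on the pair and a sums step on the option
theorem pv_step (a b : Int) (o : Option (List Int)) (r : List Int) :
    (fun (st : Int × Int × Option (List Int)) row =>
      let z : Int := row.foldl (fun acc x => if x == 0 then acc + 1 else acc) 0
      let st1 := if z > st.2.1 then ((row.length : Int), z, st.2.2) else st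
      let sums := match st1.2.2 with
        | none => some row
        | some s => some (List.zipWith (· + ·) s row)
      (st1.1, st1.2.1, sums)) (a, b, o) r
    = (((fun (st : Int × Int) row =>
          if (PySem.List.count row 0 : Int) > st.2 then ((row.length : Int), (PySem.List.count row 0 : Int)) else st) (a, b) r).1,
       ((fun (st : Int × Int) row =>
          if (PySem.List.count row 0 : Int) > st.2 then ((row.length : Int), (PySem.List.count row 0 : Int)) else st) (a, b) r).2,
       (fun (o : Option (List Int)) row =>
          match o with
          | none => some row
          | some s => some (List.zipWith (· + ·) s row)) o r) := by
  dsimp only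
  rw [pv_zcount]
  simp only [PySem.List.count_eq]
  split_ifs <;> rfl

-- B's fused fold computes A's first loop together with the option-fold of the running sums
theorem pv_fold3 (l : List (List Int)) (a b : Int) (o : Option (List Int)) :
    l.foldl (fun (st : Int × Int × Option (List Int)) row =>
      let z : Int := row.foldl (fun acc x => if x == 0 then acc + 1 else acc) 0
      let st1 := if z > st.2.1 then ((row.length : Int), z, st.2.2) else st
      let sums := match st1.2.2 with
        | none => some row
        | some s => some (List.zipWith (· + ·) s row)
      (st1.1, st1.2.1, sums)) (a, b, o)
    = ((l.foldl (fun (st : Int × Int) row =>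
          if (PySem.List.count row 0 : Int) > st.2 then ((row.length : Int), (PySem.List.count row 0 : Int)) else st) (a, b)).1,
       (l.foldl (fun (st : Int × Int) row =>
          if (PySem.List.count row 0 : Int) > st.2 then ((row.length : Int), (PySem.List.count row 0 : Int)) else st) (a, b)).2,
       l.foldl (fun (o : Option (List Int)) row =>
          match o with
          | none => some row
          | some s => some (List.zipWith (· + ·) s row)) o) := by
  induction l generalizing a b o with
  | nil => rfl
  | cons r t ih =>
    rw [List.foldl_cons, List.foldl_cons, List.foldl_cons]
    exact (congrArg (fun s => List.foldl (fun (st : Int × Int × Option (List Int)) row =>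
      let z : Int := row.foldl (fun acc x => if x == 0 then acc + 1 else acc) 0
      let st1 := if z > st.2.1 then ((row.length : Int), z, st.2.2) else st
      let sums := match st1.2.2 with
        | none => some row
        | some s => some (List.zipWith (· + ·) s row)
      (st1.1, st1.2.1, sums)) s t) (pv_step a b o r)).trans (ih _ _ _)

theorem pv_foldl_min_le (l : List Nat) (a : Nat) : l.foldl min a ≤ a := by
  induction l generalizing a with
  | nil => simp
  | cons x t ih => exact le_trans (ih _) (Nat.min_le_left _ _)

theorem pv_foldl_min_le_mem (l : List Nat) (a : Nat) : ∀ n ∈ l, l.foldl min a ≤ n := by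
  induction l generalizing a with
  | nil => simp
  | cons x t ih =>
    intro n hn
    rcases List.mem_cons.1 hn with rfl | hn
    · simp only [List.foldl_cons]
      exact le_trans (pv_foldl_min_le t _) (Nat.min_le_right a n)
    · exact ih _ _ hn

theorem pv_range_map_getD (l : List Int) :
    (List.range l.length).map (fun i => l.getD i 0) = l := by
  apply List.ext_getElem
  · simp
  · intro i h1 h2
    simp [List.getD_eq_getElem?_getD, h2]

theorem pv_zipWith_getD (s r : List Int) (i : Nat) (h : i < min s.length r.length) :
    (List.zipWith (· + ·) s r).getD i 0 = s.getD i 0 + r.getD i 0 := by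
  have hs : i < s.length := lt_of_lt_of_le h (Nat.min_le_left _ _)
  have hr : i < r.length := lt_of_lt_of_le h (Nat.min_le_right _ _)
  have hz : i < (List.zipWith (· + ·) s r).length := by simpa using h
  simp [hs, hr]

-- the running zipWith accumulation computes the truncated column sums in closed form
theorem pv_zipfold (t : List (List Int)) (s : List Int) :
    t.foldl (fun a r => List.zipWith (· + ·) a r) s
    = (List.range ((t.map List.length).foldl min s.length)).map
        (fun i => s.getD i 0 + pvColSum t i) := by
  induction t generalizing s with
  | nil =>
    simp only [List.map_nil, List.foldl_nil, pvColSum, List.sum_nil, add_zero]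
    exact (pv_range_map_getD s).symm
  | cons r t ih =>
    simp only [List.foldl_cons, List.map_cons]
    rw [ih]
    have hlen : (List.zipWith (· + ·) s r).length = min s.length r.length := by simp
    rw [hlen, Nat.min_comm s.length r.length]
    apply List.map_congr_left
    intro i hi
    simp only [List.mem_range] at hi
    have hle : (t.map List.length).foldl min (min r.length s.length) ≤ min r.length s.length :=
      pv_foldl_min_le _ _
    have hmin : i < min s.length r.length := by omega
    rw [pv_zipWith_getD s r i hmin]
    simp only [pvColSum, List.map_cons, List.sum_cons]
    ring

-- B's sums after the fused pass, for a nonempty grid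
theorem pv_sums_closed (g : List Int) (t : List (List Int)) :
    (g :: t).foldl (fun (o : Option (List Int)) row =>
        match o with
        | none => some row
        | some s => some (List.zipWith (· + ·) s row)) none
    = some ((List.range (pvMinL (g :: t))).map (pvColSum (g :: t))) := by
  have hlift : ∀ (l : List (List Int)) (s : List Int),
      l.foldl (fun (o : Option (List Int)) row =>
        match o with
        | none => some row
        | some s => some (List.zipWith (· + ·) s row)) (some s)
      = some (l.foldl (fun a r => List.zipWith (· + ·) a r) s) := by
    intro l
    induction l with
    | nil => intro s; rfl
    | cons r t ih => intro s; simpa using ih _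
  simp only [List.foldl_cons]
  rw [hlift t g, pv_zipfold]
  have hm : pvMinL (g :: t) = (t.map List.length).foldl min g.length := by
    simp only [pvMinL, List.map_cons, List.min?_cons', Option.getD_some]
  rw [hm]
  congr 1

theorem pv_foldl_min_pos (l : List Nat) (a : Nat) (ha : 0 < a) (h : ∀ n ∈ l, 0 < n) :
    0 < l.foldl min a := by
  induction l generalizing a with
  | nil => simpa
  | cons x t ih =>
    exact ih _ (lt_min ha (h x (by simp))) (fun n hn => h n (by simp [hn]))

theorem pv_foldl_min_pred (l : List Nat) (a : Nat) :
    (l.map (fun n => n - 1)).foldl min (a - 1) = l.foldl min a - 1 := by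
  induction l generalizing a with
  | nil => simp
  | cons x t ih =>
    simp only [List.map_cons, List.foldl_cons]
    rw [show min (a-1) (x-1) = min a x - 1 by omega]
    exact ih (min a x)

theorem pv_minL_succ (x : Int) (xs : List Int) (rest : List (List Int))
    (h : ∀ r ∈ rest, r ≠ []) :
    pvMinL ((x :: xs) :: rest) = pvMinL (xs :: rest.map (fun r => r.drop 1)) + 1 := by
  simp only [pvMinL, List.map_cons, List.min?_cons', Option.getD_some, List.map_map, List.length_cons]
  have hcomp : rest.map (List.length ∘ fun r => r.drop 1) = (rest.map List.length).map (fun n => n - 1) := by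
    simp [List.map_map, Function.comp_def]
  rw [hcomp]
  have := pv_foldl_min_pred (rest.map List.length) (xs.length + 1)
  simp only [Nat.add_sub_cancel] at this
  rw [this]
  have hpos : 0 < (rest.map List.length).foldl min (xs.length + 1) := by
    apply pv_foldl_min_pos _ _ (by omega)
    intro n hn
    rcases List.mem_map.1 hn with ⟨r, hr, rfl⟩
    have := h r hr
    cases r <;> simp_all
  omega

theorem pv_minL_zero_of_empty (gs : List (List Int)) (r : List Int) (hr : r ∈ gs) (he : r = []) :
    pvMinL gs = 0 := by
  cases gs with
  | nil => rfl
  | cons g t =>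
    simp only [pvMinL, List.map_cons, List.min?_cons', Option.getD_some]
    have h0 : (0:Nat) ∈ g.length :: t.map List.length ∨ g.length = 0 := by
      rcases List.mem_cons.1 hr with rfl | hr
      · right; simp [he]
      · left; right; exact List.mem_map.2 ⟨r, hr, by simp [he]⟩
    rcases h0 with h0 | h0
    · rcases List.mem_cons.1 h0 with h0 | h0
      · have := pv_foldl_min_le (t.map List.length) g.length; omega
      · have := pv_foldl_min_le_mem (t.map List.length) g.length 0 h0; omega
    · have := pv_foldl_min_le (t.map List.length) g.length; omega

theorem pv_getD_succ (r : List Int) (i : Nat) : r.getD (i+1) 0 = (r.drop 1).getD i 0 := by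
  cases r <;> simp

theorem pv_colSum_succ (x : Int) (xs : List Int) (rest : List (List Int)) (i : Nat) :
    pvColSum ((x :: xs) :: rest) (i+1) = pvColSum (xs :: rest.map (fun r => r.drop 1)) i := by
  simp only [pvColSum, List.map_cons, List.getD_cons_succ, List.map_map]
  congr 1
  · congr 1
    apply List.map_congr_left
    intro r _
    exact pv_getD_succ r i

theorem pv_colSum_zero (x : Int) (xs : List Int) (rest : List (List Int)) :
    pvColSum ((x :: xs) :: rest) 0 = (x :: rest.map (fun r => r.headD 0)).sum := by
  simp only [pvColSum, List.map_cons, List.getD_cons_zero, List.sum_cons]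
  congr 1
  congr 1
  apply List.map_congr_left
  intro r _
  cases r <;> simp

theorem pv_len_zipStar (gs : List (List Int)) : ∀ c ∈ pvZipStar gs, c.length = gs.length := by
  fun_induction pvZipStar gs with
  | case3 rest x xs h ih =>
    intro c hc
    simp only [List.map_subtype, List.unattach_attach] at ih
    rcases List.mem_cons.1 hc with rfl | hc
    · simp
    · have := ih c hc; simpa using this
  | _ => simp

-- the sums of the columns A transposes out are exactly the truncated column sums, in order
theorem pv_zipStar_sums (gs : List (List Int)) :
    (pvZipStar gs).map List.sum = (List.range (pvMinL gs)).map (pvColSum gs) := by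
  fun_induction pvZipStar gs with
  | case1 => simp [pvMinL]
  | case2 rest =>
    rw [pv_minL_zero_of_empty ([] :: rest) [] (by simp) rfl]
    simp
  | case3 rest x xs h ih =>
    simp only [List.map_subtype, List.unattach_attach] at ih
    have hall : ∀ r ∈ rest, r ≠ [] := by
      intro r hr
      have := List.all_eq_true.1 h r hr
      simpa using this
    rw [List.map_cons, pv_minL_succ x xs rest hall, List.range_succ_eq_map, List.map_cons,
      pv_colSum_zero, ih, List.map_map]
    congr 1
    apply List.map_congr_left
    intro i _
    exact (pv_colSum_succ x xs rest i).symm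
  | case4 rest x xs h =>
    have : ∃ r ∈ rest, r = [] := by
      by_contra hc
      push Not at hc
      exact h (List.all_eq_true.2 (fun r hr => by simpa using hc r hr))
    rcases this with ⟨r, hr, rfl⟩
    rw [pv_minL_zero_of_empty ((x::xs) :: rest) [] (by simp [hr]) rfl]
    simp

-- A's running-max loop over columns of common length L equals B's loop over their sums
theorem pv_fold2 (cs : List (List Int)) (L : Nat) (hL : ∀ c ∈ cs, c.length = L) (st : Int × Int) :
    cs.foldl (fun (st : Int × Int) col =>
      if col.sum > st.2 then ((col.length : Int), col.sum) else st) st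
    = (cs.map List.sum).foldl (fun (p : Int × Int) s =>
      if s > p.2 then ((L : Int), s) else p) st := by
  induction cs generalizing st with
  | nil => rfl
  | cons c t ih =>
    simp only [List.foldl_cons, List.map_cons]
    rw [hL c List.mem_cons_self]
    exact ih (fun d hd => hL d (List.mem_cons_of_mem _ hd)) _

-- ===== VERDICT =====
theorem find_most_zeros_and_total_spec : Claim_equal_find_most_zeros_and_total := by
  intro grid _
  unfold Spec_find_most_zeros_and_total
  show find_most_zeros_and_total grid = find_most_zeros_and_total_alt grid
  unfold find_most_zeros_and_total find_most_zeros_and_total_alt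
  dsimp only
  refine Prod.ext ?_ ?_
  · rw [pv_fold3]
  · rw [pv_fold3]
    rw [pv_fold2 (pvZipStar grid) grid.length (pv_len_zipStar grid) (0, 0)]
    rw [pv_zipStar_sums]
    cases grid with
    | nil => rfl
    | cons g t => rw [pv_sums_closed g t]; rfl
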